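-- pv_equiv track=rewrite | github.com/Akashdeep-Soni/College-Work | Fifth Semester/Training/InfyTQ Pyhton/Fundamental/Assignment/28 July/p3.py | prod_list
-- ===== SOURCE A (Python) =====
-- def prod_list(l):
--     if 7 in l:
--         if l.index(7) == len(l)-1:
--             return -1
--         else:
--             l = l[l.index(7)+1:]
--     prod = 1
--     for i in l:
--         prod *= i
--     return prod
-- ===== SOURCE B (Python) =====
-- def prod_list(l):
--     prod = 1
--     seven_pos = -1
--     for i, x in enumerate(l):
--         if x == 7 and seven_pos == -1:
--             seven_pos = i
--             prod = 1
--         else: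
--             prod *= x
--     if seven_pos == len(l) - 1 and seven_pos != -1:
--         return -1
--     return prod
-- ===== Notes on version B (the rewrite author's own statement) =====
-- stated objective: alternative
-- what changed: Replaces the membership test + .index + slice + separate product loop (three scans) by a single enumerate pass maintaining a product accumulator that is reset when the first 7 is seen, plus its recorded position.
import Mathlib
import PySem

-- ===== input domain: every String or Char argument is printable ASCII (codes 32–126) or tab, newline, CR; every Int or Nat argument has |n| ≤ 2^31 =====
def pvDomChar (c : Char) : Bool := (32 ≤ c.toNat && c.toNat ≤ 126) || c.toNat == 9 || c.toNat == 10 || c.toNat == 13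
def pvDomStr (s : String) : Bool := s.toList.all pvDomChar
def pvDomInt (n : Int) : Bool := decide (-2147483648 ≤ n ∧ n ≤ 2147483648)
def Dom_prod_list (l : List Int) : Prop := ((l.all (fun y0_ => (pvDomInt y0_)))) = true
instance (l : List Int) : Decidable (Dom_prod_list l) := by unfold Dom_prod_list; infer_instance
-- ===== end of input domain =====

-- B replaces A's membership test + .index + slice + product loop by one enumerate pass
-- with a resettable product accumulator and recorded first-7 position (alternative decomposition).


-- ===== PORT A =====
def prod_list (l : List Int) : Int :=
  if (7 : Int) ∈ l then
    if PySem.List.index? l 7 = some (l.length - 1) then -1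
    else
      let l' := PySem.List.slice l (some (((PySem.List.index? l 7).getD 0 : Nat) + 1 : Int)) none
      l'.foldl (fun prod i => prod * i) 1
  else l.foldl (fun prod i => prod * i) 1

-- ===== PORT B =====
-- the loop body of Source B's for-loop (state = (prod, seven_pos))
def pvStep (s : Int × Int) (p : Int × Int) : Int × Int :=
  if p.2 = 7 ∧ s.2 = -1 then (1, p.1) else (s.1 * p.2, s.2)

def prod_list_alt (l : List Int) : Int :=
  let s := (PySem.List.enumerate l 0).foldl pvStep (1, -1)
  if s.2 = (l.length : Int) - 1 ∧ s.2 ≠ -1 then -1 else s.1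

-- ===== PRECONDITION & SPEC =====
def Spec_prod_list (l : List Int) (out : Int) : Prop := out = prod_list_alt l
instance (l : List Int) (out : Int) : Decidable (Spec_prod_list l out) := by unfold Spec_prod_list; infer_instance

-- ===== CLAIM (what is proved, stated in full; the proofs are below) =====
def Claim_equal_prod_list : Prop := ∀ (l : List Int), Dom_prod_list l → Spec_prod_list l (prod_list l)

-- ===== LEMMAS AND PROOFS =====

-- before the first 7: the fold just multiplies, seven_pos stays -1
theorem pvFold_no7 (l : List Int) (h : (7 : Int) ∉ l) :
    ∀ (s0 p : Int), (PySem.List.enumerate l s0).foldl pvStep (p, -1) = (l.foldl (· * ·) p, -1) := by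
  induction l with
  | nil => intro s0 p; simp [PySem.List.enumerate_nil]
  | cons x xs ih =>
    intro s0 p
    have hx : x ≠ 7 := fun hx => h (by simp [hx])
    have hxs : (7 : Int) ∉ xs := fun hm => h (List.mem_cons_of_mem _ hm)
    simp only [PySem.List.enumerate_cons, List.foldl_cons, pvStep]
    rw [if_neg (by simp [hx])]
    exact ih hxs (s0 + 1) (p * x)

-- after the first 7 is recorded (seven_pos ≠ -1): the fold multiplies, seven_pos is kept
theorem pvFold_set (l : List Int) (k : Int) (hk : k ≠ -1) :
    ∀ (s0 p : Int), (PySem.List.enumerate l s0).foldl pvStep (p, k) = (l.foldl (· * ·) p, k) := by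
  induction l with
  | nil => intro s0 p; simp [PySem.List.enumerate_nil]
  | cons x xs ih =>
    intro s0 p
    simp only [PySem.List.enumerate_cons, List.foldl_cons, pvStep]
    rw [if_neg (by simp [hk])]
    exact ih (s0 + 1) (p * x)

-- ===== VERDICT (by name: the statement is the Claim_ definition above) =====
theorem prod_list_spec : Claim_equal_prod_list := by
  intro l _
  unfold Spec_prod_list prod_list prod_list_alt
  by_cases h7 : (7 : Int) ∈ l
  · -- decompose l at the first 7
    obtain ⟨k, hk⟩ := (PySem.List.index?_isSome_iff l 7).2 h7 |> Option.isSome_iff_exists.1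
    obtain ⟨pre, suf, hl, hlen, hpre⟩ := (PySem.List.index?_eq_some_iff _ _ _).1 hk
    subst hl; subst hlen
    rw [if_pos h7, hk]
    -- B-side fold over the decomposition
    have hB : (PySem.List.enumerate (pre ++ 7 :: suf) 0).foldl pvStep (1, -1)
        = (suf.foldl (· * ·) 1, (pre.length : Int)) := by
      rw [PySem.List.enumerate_append, List.foldl_append, pvFold_no7 pre hpre,
          PySem.List.enumerate_cons, List.foldl_cons]
      show (PySem.List.enumerate suf _).foldl pvStep (pvStep _ _) = _
      rw [show pvStep (pre.foldl (· * ·) 1, -1) ((0 : Int) + pre.length, 7)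
            = (1, (pre.length : Int)) by simp [pvStep]]
      exact pvFold_set suf _ (by omega) _ _
    rw [hB]
    have hlen : (pre ++ 7 :: suf).length = pre.length + suf.length + 1 := by
      simp; omega
    by_cases hsuf : suf = []
    · subst hsuf
      rw [if_pos (by simp), if_pos (by refine ⟨by simp, ?_⟩; simp)]
    · have hslen : 0 < suf.length := List.length_pos_iff.2 hsuf
      rw [if_neg (by simp [hlen]; omega), if_neg (by push_cast [hlen]; omega)]
      simp only [Option.getD_some]
      rw [show ((pre.length : Int) + 1) = ((pre.length + 1 : Nat) : Int) by push_cast; ring,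
          PySem.List.slice_from_natCast]
      rw [show (pre ++ 7 :: suf).drop (pre.length + 1) = suf by
            simpa using List.drop_append (l₁ := pre) (l₂ := 7 :: suf) (i := 1)]
  · rw [if_neg h7, pvFold_no7 l h7, if_neg (by simp)]
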